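-- pv_equiv track=rewrite | github.com/namin/dafny-sketcher | vfp/fine.py | annotate_body
-- ===== SOURCE A (Python) =====
-- def annotate_body(b: str) -> str:
--     s = ""
--     k = []
--     c = 0
--     for x in b:
--         if x == '{':
--             s += '{/*'+str(c)+'*/'
--             k = k + [c]
--             c += 1
--         elif x == '}':
--             s += '/*'+str(k.pop())+'*/}'
--         else:
--             s += x
--     return s
-- ===== SOURCE B (Python) =====
-- def annotate_body(b: str) -> str:
--     # Recursive-descent annotator: a shared position index and label counter;
--     # each '{' takes the next label, the recursive call consumes the nested
--     # content, and the matching '}' (if any) is annotated with the same label.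
--     out = []
--     n = len(b)
--
--     def seg(i: int, c: int):
--         # annotate until an unmatched '}' or the end of the string;
--         # return (position stopped at, next free label)
--         while i < n and b[i] != '}':
--             if b[i] == '{':
--                 m = c
--                 out.append('{/*' + str(m) + '*/')
--                 i, c = seg(i + 1, c + 1)
--                 if i < n:  # b[i] is the matching '}'
--                     out.append('/*' + str(m) + '*/}')
--                     i += 1
--             else:
--                 out.append(b[i])
--                 i += 1
--         return i, c
--
--     i, c = seg(0, 0)
--     while i < n:
--         # top-level '}' with no matching '{' (A raises IndexError here)
--         out.append(b[i])
--         i, c = seg(i + 1, c)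
--     return ''.join(out)
-- ===== Notes on version B (the rewrite author's own statement) =====
-- stated objective: alternative
-- what changed: Replaces the stack-of-labels fold with a recursive-descent parser over a shared position index and label counter that annotates each matching close brace from the recursion structure, accumulating chunks joined once instead of repeated string and list concatenation.
import Mathlib
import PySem

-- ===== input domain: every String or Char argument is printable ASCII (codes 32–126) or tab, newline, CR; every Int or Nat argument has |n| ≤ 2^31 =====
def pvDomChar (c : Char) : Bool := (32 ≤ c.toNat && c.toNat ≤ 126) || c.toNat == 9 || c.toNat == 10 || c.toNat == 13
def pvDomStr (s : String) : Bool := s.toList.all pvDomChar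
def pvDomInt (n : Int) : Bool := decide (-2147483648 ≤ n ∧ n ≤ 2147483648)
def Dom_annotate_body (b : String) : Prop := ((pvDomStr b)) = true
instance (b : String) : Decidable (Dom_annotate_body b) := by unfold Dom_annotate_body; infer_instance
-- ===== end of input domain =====

-- B replaces A's stack-of-labels fold by a recursive-descent parser over a shared
-- position and label counter; A = B is proved on strings whose every prefix has at
-- least as many '{' as '}' (elsewhere A raises IndexError).

-- ===== PORT A =====
-- A's loop body: state (s, k, c) = (output so far, stack of open labels, counter)
def pvAnnStep (acc : List Char × List Int × Int) (x : Char) : List Char × List Int × Int :=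
  let (s, k, c) := acc
  if x = '{' then
    (s ++ '{' :: '/' :: '*' :: (PySem.Int.toChars c ++ ['*', '/']), k ++ [c], c + 1)
  else if x = '}' then
    match PySem.List.pop? k with
    | some (m, k') => (s ++ '/' :: '*' :: (PySem.Int.toChars m ++ ['*', '/', '}']), k', c)
    | none => (s, k, c)  -- Python raises IndexError here; excluded by Pre_annotate_body
  else (s ++ [x], k, c)

def annotate_body (b : String) : String :=
  String.ofList (b.toList.foldl pvAnnStep ([], [], 0)).1

-- ===== PORT B =====
def pvOpenAnn (m : Int) : List Char := '{' :: '/' :: '*' :: (PySem.Int.toChars m ++ ['*', '/'])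
def pvCloseAnn (m : Int) : List Char := '/' :: '*' :: (PySem.Int.toChars m ++ ['*', '/', '}'])

-- Source B's seg: annotate until an unmatched '}' or the end; returns (output, rest, next label).
-- The Nat argument is fuel, a totality guard only: any fuel > input length is enough.
def pvSegB : Nat → List Char → Int → List Char × List Char × Int
  | 0, xs, c => ([], xs, c)
  | _ + 1, [], c => ([], [], c)
  | f + 1, x :: xs, c =>
    if x = '}' then ([], x :: xs, c)
    else if x = '{' then
      let r1 := pvSegB f xs (c + 1)
      match r1.2.1 with
      | '}' :: rest' =>
        let r2 := pvSegB f rest' r1.2.2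
        (pvOpenAnn c ++ r1.1 ++ pvCloseAnn c ++ r2.1, r2.2)
      | _ => (pvOpenAnn c ++ r1.1, r1.2)
    else
      let r := pvSegB f xs c
      (x :: r.1, r.2)

-- Source B's top-level loop: copy a stray '}' and continue (fuel is again only a guard)
def pvTopB : Nat → List Char → Int → List Char
  | 0, _, _ => []
  | f + 1, xs, c =>
    let r := pvSegB (xs.length + 1) xs c
    match r.2.1 with
    | [] => r.1
    | y :: rest' => r.1 ++ y :: pvTopB f rest' r.2.2

def annotate_body_alt (b : String) : String :=
  String.ofList (pvTopB (b.toList.length + 1) b.toList 0)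

-- ===== PRECONDITION & SPEC =====
-- Pre_ excludes exactly the strings on which A raises IndexError (a '}' whose prefix
-- holds no unmatched '{': pop() on an empty stack).
def Pre_annotate_body (b : String) : Prop :=
  ∀ p ∈ b.toList.inits, p.count '}' ≤ p.count '{'
instance (b : String) : Decidable (Pre_annotate_body b) := by unfold Pre_annotate_body; infer_instance
def pvWitness_annotate_body : String := "a{b{ }}c{}"

def Spec_annotate_body (b : String) (out : String) : Prop := out = annotate_body_alt b
instance (b : String) (out : String) : Decidable (Spec_annotate_body b out) := by unfold Spec_annotate_body; infer_instance

-- ===== CLAIM (what is proved, stated in full; the proofs are below) =====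
def Claim_equal_annotate_body : Prop := ∀ (b : String), Dom_annotate_body b → Pre_annotate_body b → Spec_annotate_body b (annotate_body b)

-- ===== LEMMAS AND PROOFS =====

-- pvSegB's remainder is [] or starts with the unmatched '}' of a balanced consumed prefix
theorem pvSegB_rest_shape (f : Nat) : ∀ (xs : List Char) (c : Int), xs.length < f →
    (pvSegB f xs c).2.1 = [] ∨
    ∃ p t, xs = p ++ '}' :: t ∧ p.count '{' = p.count '}' ∧ (pvSegB f xs c).2.1 = '}' :: t := by
  induction f with
  | zero => intro xs c h; omega
  | succ f ih =>
    intro xs c h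
    match xs with
    | [] => left; simp [pvSegB]
    | x :: ys =>
      simp only [List.length_cons, Nat.succ_lt_succ_iff] at h
      by_cases hx : x = '}'
      · right
        exact ⟨[], ys, by simp [hx], by simp, by simp [pvSegB, hx]⟩
      · by_cases ho : x = '{'
        · subst ho
          rcases h1 : (pvSegB f ys (c + 1)).2.1 with _ | ⟨y, rest'⟩
          · left; simp [pvSegB, h1]
          · rcases ih ys (c + 1) h with h0 | ⟨p1, t1, hys, hcnt1, hrest1⟩
            · rw [h0] at h1; cases h1
            · rw [h1] at hrest1
              injection hrest1 with hy ht
              subst hy; subst ht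
              have hlen1 : rest'.length < f := by
                have := congrArg List.length hys
                simp at this; omega
              rcases ih rest' (pvSegB f ys (c + 1)).2.2 hlen1 with h2 | ⟨p2, t2, hr2, hcnt2, hrest2⟩
              · left; simp [pvSegB, h1, h2]
              · right
                refine ⟨'{' :: p1 ++ '}' :: p2, t2, ?_, ?_, ?_⟩
                · simp [hys, hr2]
                · simp [List.count_append, hcnt1, hcnt2]
                  omega
                · simp [pvSegB, h1, hrest2]
        · rcases ih ys c h with h0 | ⟨p1, t1, hys, hcnt, hrest⟩
          · left; simp [pvSegB, hx, ho, h0]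
          · right
            refine ⟨x :: p1, t1, by simp [hys], ?_, by simp [pvSegB, hx, ho, hrest]⟩
            simp [hx, ho, hcnt]

-- the core correspondence: A's fold over a segment produces B's chunks and, when the
-- segment stops at a '}', restores A's stack to what it was at the segment's start
theorem pvSegB_foldA (f : Nat) : ∀ (xs s : List Char) (k : List Int) (c : Int),
    xs.length < f →
    ((pvSegB f xs c).2.1 = [] →
      (xs.foldl pvAnnStep (s, k, c)).1 = s ++ (pvSegB f xs c).1) ∧
    (∀ t, (pvSegB f xs c).2.1 = '}' :: t →
      xs.foldl pvAnnStep (s, k, c)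
        = List.foldl pvAnnStep (s ++ (pvSegB f xs c).1, k, (pvSegB f xs c).2.2) ('}' :: t)) := by
  induction f with
  | zero => intro xs s k c h; omega
  | succ f ih =>
    intro xs s k c h
    match xs with
    | [] => exact ⟨fun _ => by simp [pvSegB], fun t ht => by simp [pvSegB] at ht⟩
    | x :: ys =>
      simp only [List.length_cons, Nat.succ_lt_succ_iff] at h
      by_cases hx : x = '}'
      · subst hx
        refine ⟨fun h0 => by simp [pvSegB] at h0, fun t ht => ?_⟩
        obtain rfl : t = ys := by simpa [pvSegB] using ht.symm
        simp [pvSegB]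
      · by_cases ho : x = '{'
        · subst ho
          have hstep : pvAnnStep (s, k, c) '{' = (s ++ pvOpenAnn c, k ++ [c], c + 1) := by
            simp [pvAnnStep, pvOpenAnn]
          rcases h1 : (pvSegB f ys (c + 1)).2.1 with _ | ⟨y, rest'⟩
          · -- inner segment consumed all input: unmatched '{', output stops here
            refine ⟨fun _ => ?_, fun t ht => by simp [pvSegB, h1] at ht⟩
            have := (ih ys (s ++ pvOpenAnn c) (k ++ [c]) (c + 1) h).1 h1
            simp only [List.foldl_cons, hstep]
            simp [pvSegB, h1, this]
          · rcases pvSegB_rest_shape f ys (c + 1) h with h0 | ⟨p1, t1, hys, _, hr⟩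
            · rw [h0] at h1; cases h1
            · rw [h1] at hr
              injection hr with hy ht
              subst hy; subst ht
              have h2 := (ih ys (s ++ pvOpenAnn c) (k ++ [c]) (c + 1) h).2 rest' h1
              have hlen : rest'.length < f := by
                have := congrArg List.length hys
                simp at this; omega
              have hpop : pvAnnStep (s ++ pvOpenAnn c ++ (pvSegB f ys (c + 1)).1, k ++ [c],
                  (pvSegB f ys (c + 1)).2.2) '}'
                  = (s ++ pvOpenAnn c ++ (pvSegB f ys (c + 1)).1 ++ pvCloseAnn c, k,
                  (pvSegB f ys (c + 1)).2.2) := by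
                simp [pvAnnStep, PySem.List.pop?_last, pvCloseAnn]
              have h3 := ih rest' (s ++ pvOpenAnn c ++ (pvSegB f ys (c + 1)).1 ++ pvCloseAnn c)
                  k ((pvSegB f ys (c + 1)).2.2) hlen
              constructor
              · intro h0
                simp only [pvSegB, h1] at h0 ⊢
                simp only [List.foldl_cons, hstep, h2, hpop]
                rw [h3.1 h0]
                simp
              · intro t ht
                simp only [pvSegB, h1] at ht ⊢
                simp only [List.foldl_cons, hstep, h2, hpop]
                rw [h3.2 t ht]
                simp
        · have hstep : pvAnnStep (s, k, c) x = (s ++ [x], k, c) := by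
            simp [pvAnnStep, hx, ho]
          have h' := ih ys (s ++ [x]) k c h
          constructor
          · intro h0
            simp only [pvSegB, if_neg hx, if_neg ho] at h0 ⊢
            simp only [List.foldl_cons, hstep]
            rw [h'.1 h0]
            simp
          · intro t ht
            simp only [pvSegB, if_neg hx, if_neg ho] at ht ⊢
            simp only [List.foldl_cons, hstep]
            rw [h'.2 t ht]
            simp

-- ===== VERDICT (by name: the statement is the Claim_ definition above) =====
theorem annotate_body_spec : Claim_equal_annotate_body := by
  intro b _ hpre
  show annotate_body b = annotate_body_alt b
  have hf : b.toList.length < b.toList.length + 1 := Nat.lt_succ_self _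
  rcases pvSegB_rest_shape (b.toList.length + 1) b.toList 0 hf with hrest | ⟨p, t, hdec, hcnt, _⟩
  · have h1 := (pvSegB_foldA (b.toList.length + 1) b.toList [] [] 0 hf).1 hrest
    unfold annotate_body annotate_body_alt
    simp only [pvTopB, hrest, h1, List.nil_append]
  · exfalso
    have hmem : (p ++ ['}']) ∈ b.toList.inits := by
      rw [List.mem_inits]
      exact ⟨t, by simp [hdec]⟩
    have := hpre _ hmem
    simp [List.count_append] at this
    omega
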